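-- pv_equiv track=rewrite | github.com/artzbas16/TFM-main | TFM-main/mus_env/mus.py | calcular_valor_mano_grande
-- ===== SOURCE A (Python) =====
-- def calcular_valor_mano_grande(mano):
--     """Calcula el valor de una mano para GRANDE"""
--     if not mano:
--         return []
--
--     # Jerarquía para GRANDE: Rey(12), Caballo(11), Sota(10), 7, 6, 5, 4, 3, 2, As(1)
--     jerarquia_grande = [12, 11, 10, 7, 6, 5, 4, 3, 2, 1]
--
--     valores = [carta[0] for carta in mano]
--     conteo = {}
--     for valor in valores:
--         conteo[valor] = conteo.get(valor, 0) + 1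
--
--     # Crear lista de valores ordenados por jerarquía
--     resultado = []
--     for valor in jerarquia_grande:
--         if valor in conteo:
--             resultado.extend([valor] * conteo[valor])
--
--     return resultado
-- ===== SOURCE B (Python) =====
-- def calcular_valor_mano_grande(mano):
--     """Calcula el valor de una mano para GRANDE"""
--     jerarquia_grande = [12, 11, 10, 7, 6, 5, 4, 3, 2, 1]
--     rango = {v: i for i, v in enumerate(jerarquia_grande)}
--     return sorted((carta[0] for carta in mano if carta[0] in rango), key=rango.get)
-- ===== Notes on version B (the rewrite author's own statement) =====
-- stated objective: simpler
-- what changed: Replaces A's count-dict-then-fixed-hierarchy-expansion (counting sort) with a rank dictionary and a single comparison sort of the filtered card values keyed on hierarchy position.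
import Mathlib
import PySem

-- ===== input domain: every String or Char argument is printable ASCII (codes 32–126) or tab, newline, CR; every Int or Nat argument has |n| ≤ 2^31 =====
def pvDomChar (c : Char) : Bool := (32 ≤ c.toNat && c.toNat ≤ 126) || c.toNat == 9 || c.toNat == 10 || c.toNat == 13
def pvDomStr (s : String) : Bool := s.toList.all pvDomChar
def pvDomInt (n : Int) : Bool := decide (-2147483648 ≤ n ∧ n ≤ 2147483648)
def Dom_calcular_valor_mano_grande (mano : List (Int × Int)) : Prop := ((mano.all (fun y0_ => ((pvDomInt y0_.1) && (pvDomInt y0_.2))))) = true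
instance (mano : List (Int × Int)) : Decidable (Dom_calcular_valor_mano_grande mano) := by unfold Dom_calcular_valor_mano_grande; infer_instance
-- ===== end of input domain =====

-- B replaces A's count-dict-then-fixed-order-expansion by a single comparison sort of the
-- filtered card values keyed on their position in the GRANDE hierarchy (objective: simpler).

-- ===== PORT A =====
def calcular_valor_mano_grande (mano : List (Int × Int)) : List Int :=
  if mano = [] then []
  else
    let jerarquia_grande : List Int := [12, 11, 10, 7, 6, 5, 4, 3, 2, 1]
    let valores := mano.map (fun carta => carta.1)
    let conteo := valores.foldl (fun d valor => d.insert valor (d.getD valor 0 + 1)) (PySem.Dict.empty : PySem.Dict Int Int)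
    -- [valor] * conteo[valor]: the count is ≥ 1 under the 'valor in conteo' guard, so .toNat is exact
    jerarquia_grande.foldl
      (fun resultado valor =>
        if conteo.contains valor then resultado ++ List.replicate (conteo.getD valor 0).toNat valor
        else resultado) []

-- ===== PORT B =====
def calcular_valor_mano_grande_alt (mano : List (Int × Int)) : List Int :=
  let jerarquia_grande : List Int := [12, 11, 10, 7, 6, 5, 4, 3, 2, 1]
  let rango := (PySem.List.enumerate jerarquia_grande).foldl (fun d p => d.insert p.2 p.1) PySem.Dict.empty
  -- key=rango.get: every sorted element passed the 'in rango' filter, so the default 0 is unreachable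
  PySem.List.sorted ((mano.map (fun carta => carta.1)).filter (fun v => rango.contains v))
    (fun v => rango.getD v 0)

-- ===== PRECONDITION & SPEC =====
def Spec_calcular_valor_mano_grande (mano : List (Int × Int)) (out : List Int) : Prop := out = calcular_valor_mano_grande_alt mano
instance (mano : List (Int × Int)) (out : List Int) : Decidable (Spec_calcular_valor_mano_grande mano out) := by unfold Spec_calcular_valor_mano_grande; infer_instance

-- ===== CLAIM (what is proved, stated in full; the proofs are below) =====
def Claim_equal_calcular_valor_mano_grande : Prop := ∀ (mano : List (Int × Int)), Dom_calcular_valor_mano_grande mano → Spec_calcular_valor_mano_grande mano (calcular_valor_mano_grande mano)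

-- ===== LEMMAS AND PROOFS =====

-- the shared constants, for the proofs
def pvJer : List Int := [12, 11, 10, 7, 6, 5, 4, 3, 2, 1]
def pvRango : PySem.Dict Int Int := (PySem.List.enumerate pvJer).foldl (fun d p => d.insert p.2 p.1) PySem.Dict.empty

lemma pvRango_contains (v : Int) : pvRango.contains v = decide (v ∈ pvJer) := by
  have h : pvRango = PySem.Dict.mk [(12, 0), (11, 1), (10, 2), (7, 3), (6, 4), (5, 5), (4, 6), (3, 7), (2, 8), (1, 9)] := by decide
  rw [h, PySem.Dict.contains_mk, Bool.eq_iff_iff]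
  simp [pvJer, List.any]
  omega

-- two sorted-by-key lists that are permutations of each other are equal when the key is
-- injective on their elements
lemma pv_eq_of_perm_of_pairwise (key : Int → Int) :
    ∀ (xs ys : List Int), xs.Perm ys →
      xs.Pairwise (fun a b => key a ≤ key b) → ys.Pairwise (fun a b => key a ≤ key b) →
      (∀ a ∈ xs, ∀ b ∈ xs, key a = key b → a = b) → xs = ys := by
  intro xs
  induction xs with
  | nil => intro ys hp _ _ _; exact (hp.nil_eq).symm ▸ rfl
  | cons a xs ih =>
    intro ys hp hx hy hinj
    cases ys with
    | nil => exact absurd hp.symm (by simp)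
    | cons b ys =>
      have hab : a = b := by
        by_contra hne
        have hbmem : b ∈ a :: xs := hp.symm.subset (List.mem_cons_self ..)
        have hamem : a ∈ b :: ys := hp.subset (List.mem_cons_self ..)
        have hb' : b ∈ xs := by cases hbmem with
          | head => exact absurd rfl hne
          | tail _ h => exact h
        have ha' : a ∈ ys := by cases hamem with
          | head => exact absurd rfl (fun h => hne h.symm)
          | tail _ h => exact h
        have h1 : key a ≤ key b := (List.pairwise_cons.mp hx).1 b hb'
        have h2 : key b ≤ key a := (List.pairwise_cons.mp hy).1 a ha'
        exact hne (hinj a (List.mem_cons_self ..) b (List.mem_cons_of_mem _ hb') (le_antisymm h1 h2))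
      subst hab
      have hp' : xs.Perm ys := hp.cons_inv
      have := ih ys hp' (List.pairwise_cons.mp hx).2 (List.pairwise_cons.mp hy).2
        (fun x hx' y hy' => hinj x (List.mem_cons_of_mem _ hx') y (List.mem_cons_of_mem _ hy'))
      rw [this]

-- count of an element in the counting-sort expansion
lemma pv_count_flatMap (hier : List Int) (hnd : hier.Nodup) (n : Int → Nat) (x : Int) :
    (hier.flatMap (fun v => List.replicate (n v) v)).count x
      = if x ∈ hier then n x else 0 := by
  induction hier with
  | nil => simp
  | cons v t ih =>
    simp only [List.flatMap_cons, List.count_append, List.count_replicate,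
      List.mem_cons, List.nodup_cons] at *
    by_cases hvx : v = x
    · subst hvx
      rw [ih hnd.2]
      simp [hnd.1]
    · rw [ih hnd.2]
      simp [hvx, Ne.symm hvx, beq_iff_eq]

-- the counting-sort expansion is pairwise non-decreasing in the key when the hierarchy is
lemma pv_pairwise_flatMap (key : Int → Int) (hier : List Int)
    (h : hier.Pairwise (fun a b => key a ≤ key b)) (n : Int → Nat) :
    (hier.flatMap (fun v => List.replicate (n v) v)).Pairwise (fun a b => key a ≤ key b) := by
  induction hier with
  | nil => simp
  | cons v t ih =>
    simp only [List.flatMap_cons]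
    rw [List.pairwise_append]
    refine ⟨?_, ih (List.pairwise_cons.mp h).2, ?_⟩
    · rw [List.pairwise_replicate]; right; exact le_refl _
    · intro a ha b hb
      have ha' : a = v := List.eq_of_mem_replicate ha
      obtain ⟨w, hw, hbw⟩ := List.mem_flatMap.mp hb
      have hb' : b = w := List.eq_of_mem_replicate hbw
      subst ha'; subst hb'
      exact (List.pairwise_cons.mp h).1 b hw

-- A's foldl, rewritten as the flatMap expansion
lemma pv_foldl_if_extend (p : Int → Bool) (g : Int → List Int) (l : List Int) (acc : List Int) :
    l.foldl (fun resultado valor => if p valor then resultado ++ g valor else resultado) acc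
      = acc ++ l.flatMap (fun v => if p v then g v else []) := by
  have hfun : (fun (resultado : List Int) valor => if p valor then resultado ++ g valor else resultado)
      = fun resultado valor => resultado ++ (if p valor then g valor else []) := by
    funext r v; split <;> simp
  rw [hfun, PySem.List.foldl_append_eq_flatMap]

lemma pvA_char (mano : List (Int × Int)) :
    calcular_valor_mano_grande mano
      = pvJer.flatMap (fun v => List.replicate ((mano.map (fun c => c.1)).count v) v) := by
  by_cases hm : mano = []
  · subst hm; simp [calcular_valor_mano_grande, pvJer]
  · unfold calcular_valor_mano_grande
    rw [if_neg hm]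
    show pvJer.foldl (fun resultado valor =>
        if (((mano.map (fun c => c.1)).foldl (fun d valor => d.insert valor (d.getD valor 0 + 1)) (PySem.Dict.empty : PySem.Dict Int Int)).contains valor)
        then resultado ++ List.replicate (((mano.map (fun c => c.1)).foldl (fun d valor => d.insert valor (d.getD valor 0 + 1)) (PySem.Dict.empty : PySem.Dict Int Int)).getD valor 0).toNat valor
        else resultado) [] = _
    rw [PySem.Dict.foldl_insert_getD_add_one_eq_counter, pv_foldl_if_extend]
    simp only [List.nil_append]
    congr 1
    funext v
    rw [PySem.Dict.contains_counter, PySem.Dict.getD_counter]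
    by_cases hv : v ∈ mano.map (fun c => c.1)
    · simp [hv]
    · simp [hv, List.count_eq_zero_of_not_mem hv]

theorem calcular_valor_mano_grande_spec : Claim_equal_calcular_valor_mano_grande := by
  intro mano _
  unfold Spec_calcular_valor_mano_grande
  rw [pvA_char]
  show _ = PySem.List.sorted ((mano.map (fun c => c.1)).filter (fun v => pvRango.contains v))
    (fun v => pvRango.getD v 0)
  set vals : List Int := mano.map (fun c => c.1) with hvals
  set key : Int → Int := fun v => pvRango.getD v 0 with hkey
  set filt : List Int := vals.filter (fun v => pvRango.contains v) with hfilt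
  have hnd : pvJer.Nodup := by decide
  have hjp : pvJer.Pairwise (fun a b => key a ≤ key b) := by rw [hkey]; decide
  have hinjJer : ∀ a ∈ pvJer, ∀ b ∈ pvJer, key a = key b → a = b := by rw [hkey]; decide
  have hmemflat : ∀ x ∈ pvJer.flatMap (fun v => List.replicate (vals.count v) v), x ∈ pvJer := by
    intro x hx
    obtain ⟨w, hw, hxw⟩ := List.mem_flatMap.mp hx
    rw [List.eq_of_mem_replicate hxw]; exact hw
  have hperm : (pvJer.flatMap (fun v => List.replicate (vals.count v) v)).Perm filt := by
    rw [List.perm_iff_count]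
    intro x
    rw [pv_count_flatMap pvJer hnd (fun v => vals.count v) x]
    by_cases hx : x ∈ pvJer
    · rw [if_pos hx, hfilt, List.count_filter]
      rw [pvRango_contains]; exact decide_eq_true hx
    · rw [if_neg hx, eq_comm, List.count_eq_zero]
      intro hmem
      have := List.mem_filter.mp (hfilt ▸ hmem)
      rw [pvRango_contains] at this
      exact hx (of_decide_eq_true this.2)
  exact pv_eq_of_perm_of_pairwise key _ _
    (hperm.trans (PySem.List.sorted_perm filt key false).symm)
    (pv_pairwise_flatMap key pvJer hjp _) (PySem.List.sorted_pairwise filt key)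
    (fun a ha b hb h => hinjJer a (hmemflat a ha) b (hmemflat b hb) h)
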